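-- pv_equiv track=rewrite | github.com/deea-andreea/Charles-University | ML/competitions/diacritization.py | pad_and_window
-- ===== SOURCE A (Python) =====
-- def pad_and_window(texts, window_size, return_windows=True):
--     results = []
--     for line in texts:
--         if len(line) == 0:
--             continue
--
--         pad = max(window_size,
--                   (2 * window_size + 1 - len(line)) // 2)
--         padded = " " * pad + line + " " * pad
--
--         for i in range(window_size, len(padded) - window_size):
--             if return_windows:
--                 results.append(padded[i - window_size: i + window_size + 1])
--             else:
--                 results.append(padded[i])
--     return results
-- ===== SOURCE B (Python) =====
-- def pad_and_window(texts, window_size, return_windows=True):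
--     results = []
--     for line in texts:
--         if len(line) == 0:
--             continue
--
--         pad = max(window_size,
--                   (2 * window_size + 1 - len(line)) // 2)
--         padded = " " * pad + line + " " * pad
--
--         if return_windows:
--             # rolling window: start with the first window and slide it one
--             # character at a time over the rest of the padded line
--             win = padded[:2 * window_size + 1]
--             results.append(win)
--             for c in padded[2 * window_size + 1:]:
--                 win = win[1:] + c
--                 results.append(win)
--         else:
--             results.extend(padded[window_size:len(padded) - window_size])
--     return results
-- ===== Notes on version B (the rewrite author's own statement) =====
-- stated objective: alternative
-- what changed: B replaces A's slice-per-index loop by a rolling window: it takes the first window of the padded line once and then slides it (win = win[1:] + c) over the remaining characters, appending each state; for return_windows=False it extends with one middle slice instead of indexing every position.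
-- outside the precondition, e.g. on pad_and_window(['ab'], -1, True): A returns ['a', '', '', ''], B returns ['a', 'b']; on pad_and_window(['ab'], -1, False): A raises IndexError, B returns ['b']
import Mathlib
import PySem

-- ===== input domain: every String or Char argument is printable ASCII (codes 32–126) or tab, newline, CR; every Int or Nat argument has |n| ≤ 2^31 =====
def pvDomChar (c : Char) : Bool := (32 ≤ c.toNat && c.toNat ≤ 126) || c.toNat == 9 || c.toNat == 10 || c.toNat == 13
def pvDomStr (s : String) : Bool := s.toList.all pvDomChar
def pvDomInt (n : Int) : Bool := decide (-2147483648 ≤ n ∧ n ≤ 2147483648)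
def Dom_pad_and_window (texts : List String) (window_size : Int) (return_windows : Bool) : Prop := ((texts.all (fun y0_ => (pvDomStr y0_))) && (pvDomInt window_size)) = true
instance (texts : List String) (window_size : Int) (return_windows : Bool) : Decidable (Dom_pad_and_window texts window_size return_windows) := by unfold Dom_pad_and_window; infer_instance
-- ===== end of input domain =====

-- B replaces A's slice-per-index loop by a rolling window slid one character at a time
-- over the padded line (one middle slice when return_windows is False): a different
-- mechanism for the same windows, same cost.


-- ===== PORT A =====
-- one line of A's outer loop: pad, padded, and the inner index loop with a slice/index per i
def padAW_line (ws : Int) (rw : Bool) (acc : List String) (line : List Char) : List String :=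
  if line.length = 0 then acc
  else
    let pad := max ws (PySem.Int.floordiv (2 * ws + 1 - (line.length : Int)) 2)
    -- " " * pad is empty for negative pad: Int.toNat clamps exactly like Python here
    let padded := List.replicate pad.toNat ' ' ++ line ++ List.replicate pad.toNat ' '
    (PySem.List.pyRange ws ((padded.length : Int) - ws)).foldl
      (fun acc i =>
        if rw then
          acc ++ [String.ofList (PySem.Chars.slice padded (some (i - ws)) (some (i + ws + 1)))]
        else
          match PySem.List.pyGet? padded i with
          | some c => acc ++ [String.ofList [c]]
          | none => acc)   -- none = Python IndexError; such inputs are excluded by Pre_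
      acc

def pad_and_window (texts : List String) (window_size : Int) (return_windows : Bool) : List String :=
  texts.foldl (fun acc line => padAW_line window_size return_windows acc line.toList) []

-- ===== PORT B =====
-- one rolling step of Source B's inner loop: win = win[1:] + c, appended to the results
def padAW_roll_step (st : List String × List Char) (c : Char) : List String × List Char :=
  let w := PySem.Chars.slice st.2 (some 1) none ++ [c]
  (st.1 ++ [String.ofList w], w)

-- one line of Source B's loop: first window, then slide it over the rest, or one middle slice
def padAW_alt_line (ws : Int) (rw : Bool) (acc : List String) (line : List Char) : List String :=
  if line.length = 0 then acc
  else
    let pad := max ws (PySem.Int.floordiv (2 * ws + 1 - (line.length : Int)) 2)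
    let padded := List.replicate pad.toNat ' ' ++ line ++ List.replicate pad.toNat ' '
    if rw then
      let win0 := PySem.Chars.slice padded none (some (2 * ws + 1))
      ((PySem.Chars.slice padded (some (2 * ws + 1)) none).foldl padAW_roll_step
        (acc ++ [String.ofList win0], win0)).1
    else
      acc ++ (PySem.Chars.slice padded (some ws) (some ((padded.length : Int) - ws))).map
               (fun c => String.ofList [c])

def pad_and_window_alt (texts : List String) (window_size : Int) (return_windows : Bool) : List String :=
  texts.foldl (fun acc line => padAW_alt_line window_size return_windows acc line.toList) []

-- ===== PRECONDITION & SPEC =====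
-- Pre_ excludes negative window_size, outside the task's natural domain: there A raises
-- IndexError when return_windows is False, and otherwise returns accidental truncated slices.
def Pre_pad_and_window (texts : List String) (window_size : Int) (return_windows : Bool) : Prop :=
  0 ≤ window_size
instance (texts : List String) (window_size : Int) (return_windows : Bool) : Decidable (Pre_pad_and_window texts window_size return_windows) := by unfold Pre_pad_and_window; infer_instance

def pvWitness_pad_and_window : List String × Int × Bool := (["ab", "", "x y"], 1, true)

def Spec_pad_and_window (texts : List String) (window_size : Int) (return_windows : Bool) (out : List String) : Prop := out = pad_and_window_alt texts window_size return_windows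
instance (texts : List String) (window_size : Int) (return_windows : Bool) (out : List String) : Decidable (Spec_pad_and_window texts window_size return_windows out) := by unfold Spec_pad_and_window; infer_instance

-- ===== CLAIM (what is proved, stated in full; the proofs are below) =====
def Claim_equal_pad_and_window : Prop := ∀ (texts : List String) (window_size : Int) (return_windows : Bool), Dom_pad_and_window texts window_size return_windows → Pre_pad_and_window texts window_size return_windows → Spec_pad_and_window texts window_size return_windows (pad_and_window texts window_size return_windows)

-- ===== LEMMAS AND PROOFS =====

lemma pyRange_shift (a : Int) (n : Nat) :
    PySem.List.pyRange a (a + n) = (List.range n).map (fun k : Nat => a + (k : Int)) := by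
  induction n generalizing a with
  | zero => simp [PySem.List.pyRange]
  | succ n ih =>
    rw [PySem.List.pyRange_one_cons (by omega)]
    have h1 : a + ((n + 1 : Nat) : Int) = (a + 1) + (n : Nat) := by push_cast; ring
    rw [h1, ih, List.range_succ_eq_map, List.map_cons, List.map_map]
    refine congrArg₂ _ (by push_cast; ring) ?_
    exact List.map_congr_left (fun k _ => by simp only [Function.comp]; push_cast; ring)

lemma pad_eq (ws : Int) (_hws : 0 ≤ ws) (L : Nat) (hL : 0 < L) :
    max ws (PySem.Int.floordiv (2 * ws + 1 - (L : Int)) 2) = ws := by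
  rw [PySem.Int.floordiv_eq_ediv_of_pos (by norm_num)]
  omega

-- both per-line results in one common "window per position" form
lemma lineA_windows (ws : Int) (hws : 0 ≤ ws) (acc : List String) (l : List Char) (hl : l ≠ []) :
    padAW_line ws true acc l =
      acc ++ (List.range l.length).map (fun k => String.ofList
        (((List.replicate ws.toNat ' ' ++ l ++ List.replicate ws.toNat ' ').drop k).take
          (2 * ws.toNat + 1))) := by
  have hL : 0 < l.length := List.length_pos_iff.mpr hl
  simp only [padAW_line]
  rw [if_neg (by omega)]
  rw [pad_eq ws hws l.length hL]
  have hlen : ((List.replicate ws.toNat ' ' ++ l ++ List.replicate ws.toNat ' ').length : Int) - ws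
      = ws + (l.length : Int) := by
    simp [List.length_append]; omega
  rw [hlen]
  have hc : ws + (l.length : Int) = ws + ((l.length : Nat) : Int) := rfl
  rw [hc, pyRange_shift ws l.length, List.foldl_map]
  simp only [if_true]
  rw [PySem.List.foldl_append_singleton_eq_map]
  refine congrArg _ (List.map_congr_left (fun k _ => ?_))
  simp only [PySem.Chars.slice_eq_listSlice]
  have e1 : ws + (k : Int) - ws = ((k : Nat) : Int) := by push_cast; ring
  have e2 : ws + (k : Int) + ws + 1 = ((k : Nat) : Int) + ((2 * ws.toNat + 1 : Nat) : Int) := by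
    push_cast; omega
  rw [e1, e2, PySem.List.slice_natCast_add]

lemma lineA_chars (ws : Int) (hws : 0 ≤ ws) (acc : List String) (l : List Char) :
    padAW_line ws false acc l = acc ++ l.map (fun c => String.ofList [c]) := by
  rcases Decidable.em (l = []) with h | h
  · subst h; simp [padAW_line]
  · have hL : 0 < l.length := List.length_pos_iff.mpr h
    simp only [padAW_line]
    rw [if_neg (by omega)]
    rw [pad_eq ws hws l.length hL]
    have hlen : ((List.replicate ws.toNat ' ' ++ l ++ List.replicate ws.toNat ' ').length : Int) - ws
        = ws + (l.length : Int) := by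
      simp [List.length_append]; omega
    rw [hlen]
    have hc : ws + (l.length : Int) = ws + ((l.length : Nat) : Int) := rfl
    rw [hc, pyRange_shift ws l.length, List.foldl_map]
    rw [PySem.List.foldl_congr_mem _ _
      (fun acc k => acc ++ [String.ofList [l.getD k ' ']]) _ ?_]
    · rw [PySem.List.foldl_append_singleton_eq_map]
      refine congrArg _ ?_
      refine List.ext_getElem (by simp) (fun i h1 h2 => ?_)
      have hi : i < l.length := by simpa using h2
      simp [List.getD_eq_getElem?_getD, List.getElem?_eq_getElem hi]
    · intro acc2 k hk
      have hkL : k < l.length := List.mem_range.mp hk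
      have hidx : ws + (k : Int) = ((ws.toNat + k : Nat) : Int) := by push_cast; omega
      rw [hidx, PySem.List.pyGet?_natCast]
      have hget : (List.replicate ws.toNat ' ' ++ l ++ List.replicate ws.toNat ' ')[ws.toNat + k]?
          = some (l[k]'hkL) := by
        rw [List.append_assoc, List.getElem?_append_right (by simp)]
        simp only [List.length_replicate, Nat.add_sub_cancel_left]
        rw [List.getElem?_append_left hkL]
        exact List.getElem?_eq_getElem hkL
      rw [hget]
      simp [List.getD_eq_getElem?_getD, List.getElem?_eq_getElem hkL]

-- one slide of the rolling window advances the drop/take form by one position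
lemma roll_step_win (m k : Nat) (p : List Char) (h : k + m + 1 < p.length) (c : Char)
    (hc : p.drop (k + m + 1) = c :: (p.drop (k + m + 2))) :
    ((p.drop k).take (m + 1)).tail ++ [c] = (p.drop (k + 1)).take (m + 1) := by
  have h1 : ((p.drop k).take (m + 1)).tail = (p.drop (k + 1)).take m := by
    rw [← List.drop_one, List.drop_take, List.drop_drop]
    simp
  have hcv : (p.drop (k + 1))[m]? = some c := by
    have hh := congrArg List.head? hc
    rw [List.head?_drop] at hh
    rw [List.getElem?_drop]
    rw [show k + 1 + m = k + m + 1 from by omega]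
    simpa using hh
  rw [h1, List.take_add_one, hcv]
  rfl

-- the rolling fold emits exactly the remaining windows in drop/take form
lemma roll_spec (m : Nat) (p : List Char) : ∀ (k : Nat) (acc : List String),
    k + m + 1 ≤ p.length →
    ((p.drop (k + m + 1)).foldl padAW_roll_step (acc, (p.drop k).take (m + 1))).1
      = acc ++ (List.range (p.length - (k + m + 1))).map
          (fun i => String.ofList ((p.drop (k + 1 + i)).take (m + 1))) := by
  intro k acc hk
  rcases Nat.lt_or_ge (k + m + 1) p.length with hlt | hge
  · -- at least one step remains
    have hn : p.length - (k + m + 1) = (p.length - (k + m + 2)) + 1 := by omega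
    have hc : p.drop (k + m + 1) = p[k + m + 1]'hlt :: p.drop (k + m + 2) := by
      rw [show k + m + 2 = k + m + 1 + 1 from rfl]
      exact (List.drop_eq_getElem_cons hlt)
    rw [hc, List.foldl_cons]
    have hw : padAW_roll_step (acc, (p.drop k).take (m + 1)) (p[k + m + 1]'hlt)
        = (acc ++ [String.ofList ((p.drop (k + 1)).take (m + 1))], (p.drop (k + 1)).take (m + 1)) := by
      have hwin := roll_step_win m k p hlt (p[k + m + 1]'hlt) hc
      show (acc ++ [String.ofList
            (PySem.Chars.slice ((p.drop k).take (m + 1)) (some 1) none ++ [p[k + m + 1]'hlt])],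
          PySem.Chars.slice ((p.drop k).take (m + 1)) (some 1) none ++ [p[k + m + 1]'hlt]) = _
      rw [PySem.Chars.slice_eq_listSlice, PySem.List.slice_from_one, hwin]
    rw [hw]
    have hih := roll_spec m p (k + 1) (acc ++ [String.ofList ((p.drop (k + 1)).take (m + 1))]) (by omega)
    rw [show k + 1 + m + 1 = k + m + 2 from by omega] at hih
    rw [hih, hn, List.range_succ_eq_map, List.map_cons, List.map_map, List.append_assoc]
    refine congrArg _ ?_
    refine congrArg₂ _ (by first | rfl | simp) ?_
    exact (List.map_congr_left (fun i _ => by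
      simp only [Function.comp_apply]
      rw [show k + 1 + (i + 1) = k + 1 + 1 + i from by omega])).symm
  · -- no step remains
    have h0 : p.drop (k + m + 1) = ([] : List Char) := by rw [List.drop_eq_nil_iff]; omega
    have h1 : p.length - (k + m + 1) = 0 := by omega
    rw [h0, h1]
    simp
termination_by k => p.length - k
decreasing_by omega

lemma lineB_windows (ws : Int) (hws : 0 ≤ ws) (acc : List String) (l : List Char) (hl : l ≠ []) :
    padAW_alt_line ws true acc l =
      acc ++ (List.range l.length).map (fun k => String.ofList
        (((List.replicate ws.toNat ' ' ++ l ++ List.replicate ws.toNat ' ').drop k).take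
          (2 * ws.toNat + 1))) := by
  have hL : 0 < l.length := List.length_pos_iff.mpr hl
  simp only [padAW_alt_line]
  rw [if_neg (by omega)]
  rw [pad_eq ws hws l.length hL]
  set padded := List.replicate ws.toNat ' ' ++ l ++ List.replicate ws.toNat ' ' with hp
  have hplen : padded.length = ws.toNat + (l.length + ws.toNat) := by
    simp [hp, List.length_append]
  rw [if_pos trivial]
  have h1 : (2 * ws + 1 : Int) = ((2 * ws.toNat + 1 : Nat) : Int) := by push_cast; omega
  rw [h1]
  simp only [PySem.Chars.slice_eq_listSlice, PySem.List.slice_to_natCast,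
    PySem.List.slice_from_natCast]
  have h0 : padded.take (2 * ws.toNat + 1) = (padded.drop 0).take (2 * ws.toNat + 1) := by
    rw [List.drop_zero]
  rw [h0, show padded.drop (2 * ws.toNat + 1) = padded.drop (0 + 2 * ws.toNat + 1) from by rw [Nat.zero_add],
    roll_spec (2 * ws.toNat) padded 0 _ (by omega)]
  have hr : padded.length - (0 + 2 * ws.toNat + 1) = l.length - 1 := by omega
  rw [hr]
  have hrange : List.range l.length = 0 :: (List.range (l.length - 1)).map (· + 1) := by
    conv_lhs => rw [show l.length = (l.length - 1) + 1 from by omega]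
    rw [List.range_succ_eq_map]
  rw [hrange, List.map_cons, List.map_map, List.append_assoc, List.singleton_append]
  refine congrArg _ ?_
  refine congrArg₂ _ (by rfl) ?_
  exact List.map_congr_left (fun i _ => by
    simp only [Function.comp_apply]
    rw [show 0 + 1 + i = i + 1 from by omega])

lemma lineB_chars (ws : Int) (hws : 0 ≤ ws) (acc : List String) (l : List Char) :
    padAW_alt_line ws false acc l = acc ++ l.map (fun c => String.ofList [c]) := by
  rcases Decidable.em (l = []) with h | h
  · subst h; simp [padAW_alt_line]
  · have hL : 0 < l.length := List.length_pos_iff.mpr h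
    simp only [padAW_alt_line]
    rw [if_neg (by omega)]
    rw [pad_eq ws hws l.length hL]
    set padded := List.replicate ws.toNat ' ' ++ l ++ List.replicate ws.toNat ' ' with hp
    simp only [Bool.false_eq_true, if_false]
    have hplen : padded.length = ws.toNat + (l.length + ws.toNat) := by
      simp [hp, List.length_append]
    rw [PySem.Chars.slice_eq_listSlice,
        PySem.List.slice_toNat padded hws (by rw [hplen]; omega)]
    have h2 : (((padded.length : Nat) : Int) - ws).toNat - ws.toNat = l.length := by
      rw [hplen]; omega
    rw [h2]
    have hmid : (padded.drop ws.toNat).take l.length = l := by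
      rw [hp, List.append_assoc, List.drop_left' List.length_replicate, List.take_left' rfl]
    rw [hmid]

-- ===== VERDICT (by name: the statement is the Claim_ definition above) =====
theorem pad_and_window_spec : Claim_equal_pad_and_window := by
  intro texts ws rw _ hpre
  unfold Spec_pad_and_window pad_and_window pad_and_window_alt
  refine PySem.List.foldl_congr_mem _ _ _ _ (fun acc line _ => ?_)
  cases rw with
  | true =>
    rcases Decidable.em (line.toList = []) with h | h
    · simp [padAW_line, padAW_alt_line, List.length_eq_zero_iff.mpr h]
    · rw [lineA_windows ws hpre acc line.toList h, lineB_windows ws hpre acc line.toList h]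
  | false =>
    rw [lineA_chars ws hpre acc line.toList, lineB_chars ws hpre acc line.toList]
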